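-- pv_equiv track=rewrite | github.com/jooviyo001/backend-dev | app/api/v1/endpoints/files.py | is_allowed_file
-- ===== SOURCE A (Python) =====
-- ALLOWED_EXTENSIONS = {
--     'image': ['.jpg', '.jpeg', '.png', '.gif', '.bmp', '.webp'],
--     'document': ['.pdf', '.doc', '.docx', '.xls', '.xlsx', '.ppt', '.pptx', '.txt'],
--     'archive': ['.zip', '.rar', '.7z', '.tar', '.gz'],
--     'video': ['.mp4', '.avi', '.mov', '.wmv', '.flv'],
--     'audio': ['.mp3', '.wav', '.flac', '.aac']
-- }
--
-- def is_allowed_file(filename: str) -> bool: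
--     """检查文件是否允许上传"""
--     if '.' not in filename:
--         return False
--
--     extension = '.' + filename.rsplit('.', 1)[1].lower()
--     all_extensions = []
--     for extensions in ALLOWED_EXTENSIONS.values():
--         all_extensions.extend(extensions)
--
--     return extension in all_extensions
-- ===== SOURCE B (Python) =====
-- # B: one flat module-level tuple of dot-prefixed suffixes and a single
-- # lowercased-suffix test; no dict traversal, no rsplit, no membership scan.
-- _ALLOWED_SUFFIXES = (
--     '.jpg', '.jpeg', '.png', '.gif', '.bmp', '.webp',
--     '.pdf', '.doc', '.docx', '.xls', '.xlsx', '.ppt', '.pptx', '.txt',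
--     '.zip', '.rar', '.7z', '.tar', '.gz',
--     '.mp4', '.avi', '.mov', '.wmv', '.flv',
--     '.mp3', '.wav', '.flac', '.aac',
-- )
--
--
-- def is_allowed_file(filename: str) -> bool:
--     """检查文件是否允许上传"""
--     return filename.lower().endswith(_ALLOWED_SUFFIXES)
-- ===== Notes on version B (the rewrite author's own statement) =====
-- stated objective: idiomatic
-- what changed: B replaces A's dot-guard + rsplit extension extraction + flattening loop + list membership by a single endswith test of the lowercased filename against one flat tuple of dot-prefixed suffixes; correct because no allowed extension contains an internal dot.
import Mathlib
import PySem

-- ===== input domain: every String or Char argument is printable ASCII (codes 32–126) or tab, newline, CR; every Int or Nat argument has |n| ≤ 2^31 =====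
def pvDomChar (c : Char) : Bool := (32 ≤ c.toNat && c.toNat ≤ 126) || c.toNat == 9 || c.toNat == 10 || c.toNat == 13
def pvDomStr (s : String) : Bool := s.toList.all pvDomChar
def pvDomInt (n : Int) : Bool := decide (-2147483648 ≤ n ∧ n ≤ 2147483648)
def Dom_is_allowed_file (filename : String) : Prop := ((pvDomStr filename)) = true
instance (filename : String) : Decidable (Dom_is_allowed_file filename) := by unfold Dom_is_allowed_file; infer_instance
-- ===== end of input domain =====

-- B replaces A's dot-guard + rsplit extraction + flatten + membership test by one
-- lowercased-suffix test against a flat tuple of dot-prefixed suffixes (idiomatic).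

-- ===== PORT A =====
-- module constant ALLOWED_EXTENSIONS (A's dict); extensions as List Char
def pvAllowedExtensions : PySem.Dict String (List (List Char)) :=
  ⟨[("image", [".jpg".toList, ".jpeg".toList, ".png".toList, ".gif".toList, ".bmp".toList, ".webp".toList]),
    ("document", [".pdf".toList, ".doc".toList, ".docx".toList, ".xls".toList, ".xlsx".toList, ".ppt".toList, ".pptx".toList, ".txt".toList]),
    ("archive", [".zip".toList, ".rar".toList, ".7z".toList, ".tar".toList, ".gz".toList]),
    ("video", [".mp4".toList, ".avi".toList, ".mov".toList, ".wmv".toList, ".flv".toList]),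
    ("audio", [".mp3".toList, ".wav".toList, ".flac".toList, ".aac".toList])]⟩

-- hand port of filename.rsplit('.', 1)[1] (A only evaluates it when '.' ∈ filename):
-- the piece after the LAST '.'; exact there (one-char separator, maxsplit = 1).
def pvRsplitDotTail (l : List Char) : List Char :=
  (l.reverse.takeWhile (fun c => c != '.')).reverse

def is_allowed_file (filename : String) : Bool :=
  if !(PySem.Str.isIn "." filename) then false
  else
    let extension : List Char := '.' :: PySem.Chars.lower (pvRsplitDotTail filename.toList)
    let all_extensions : List (List Char) :=
      (PySem.Dict.values pvAllowedExtensions).foldl (fun acc exts => acc ++ exts) []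
    all_extensions.contains extension

-- ===== PORT B =====
-- B's module constant _ALLOWED_SUFFIXES: one flat tuple of dot-prefixed suffixes
def pvAllowedSuffixes : List String :=
  [".jpg", ".jpeg", ".png", ".gif", ".bmp", ".webp",
   ".pdf", ".doc", ".docx", ".xls", ".xlsx", ".ppt", ".pptx", ".txt",
   ".zip", ".rar", ".7z", ".tar", ".gz",
   ".mp4", ".avi", ".mov", ".wmv", ".flv",
   ".mp3", ".wav", ".flac", ".aac"]

-- filename.lower().endswith(tuple): Python's endswith on a tuple succeeds iff some member is a suffix
def is_allowed_file_alt (filename : String) : Bool :=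
  pvAllowedSuffixes.any (fun s => PySem.Chars.endswith (PySem.Chars.lower filename.toList) s.toList)

-- ===== PRECONDITION & SPEC =====
def Spec_is_allowed_file (filename : String) (out : Bool) : Prop := out = is_allowed_file_alt filename
instance (filename : String) (out : Bool) : Decidable (Spec_is_allowed_file filename out) := by unfold Spec_is_allowed_file; infer_instance

-- ===== CLAIM (what is proved, stated in full; the proofs are below) =====
def Claim_equal_is_allowed_file : Prop := ∀ (filename : String), Dom_is_allowed_file filename → Spec_is_allowed_file filename (is_allowed_file filename)

-- ===== LEMMAS AND PROOFS =====

-- lowering a character yields '.' exactly for '.'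
lemma pv_lowerChar_dot_iff (c : Char) : PySem.Chars.lowerChar c = '.' ↔ c = '.' := by
  unfold PySem.Chars.lowerChar
  by_cases h : PySem.Chars.isupper c = true
  · rw [if_pos h]
    unfold PySem.Chars.isupper at h
    simp only [Bool.and_eq_true, decide_eq_true_eq] at h
    have h65 : 65 ≤ c.toNat := UInt32.le_iff_toNat_le.mp (Char.le_def.mp h.1)
    have h90 : c.toNat ≤ 90 := UInt32.le_iff_toNat_le.mp (Char.le_def.mp h.2)
    constructor
    · intro hc
      have hv := congrArg Char.toNat hc
      rw [Char.toNat_ofNat, if_pos (Or.inl (by omega : c.toNat + 32 < 0xd800))] at hv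
      have h46 : ('.' : Char).toNat = 46 := by decide
      omega
    · intro hc
      subst hc
      exact absurd h65 (by decide)
  · rw [if_neg h]

-- takeWhile (≠ '.') stops exactly at the first '.'
lemma pv_takeWhile_no_dot (a b : List Char) (ha : '.' ∉ a) :
    (a ++ '.' :: b).takeWhile (fun c => c != '.') = a := by
  induction a with
  | nil => simp
  | cons c a' ih =>
    have hc : c ≠ '.' := fun h => ha (h ▸ List.mem_cons_self)
    have ha' : '.' ∉ a' := fun h => ha (List.mem_cons_of_mem _ h)
    simp [hc, ih ha']

lemma pv_rev_decomp (r : List Char) (h : '.' ∈ r) :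
    ∃ t, r = r.takeWhile (fun c => c != '.') ++ '.' :: t := by
  induction r with
  | nil => simp at h
  | cons c r' ih =>
    by_cases hc : c = '.'
    · subst hc; exact ⟨r', by simp⟩
    · have hm : '.' ∈ r' := by
        rcases List.mem_cons.mp h with h1 | h1
        · exact absurd h1.symm hc
        · exact h1
      obtain ⟨t, ht⟩ := ih hm
      refine ⟨t, ?_⟩
      simp only [List.takeWhile_cons]
      rw [if_pos (by simp [hc]), List.cons_append]
      exact congrArg (c :: ·) ht

lemma pv_exists_decomp (l : List Char) (h : '.' ∈ l) :
    ∃ pre, l = pre ++ '.' :: pvRsplitDotTail l ∧ '.' ∉ pvRsplitDotTail l := by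
  have hr : '.' ∈ l.reverse := List.mem_reverse.mpr h
  obtain ⟨t, ht⟩ := pv_rev_decomp l.reverse hr
  refine ⟨t.reverse, ?_, ?_⟩
  · conv_lhs => rw [← l.reverse_reverse, ht]
    simp [pvRsplitDotTail]
  · intro hm
    have hm' : '.' ∈ l.reverse.takeWhile (fun c => c != '.') := by
      simpa [pvRsplitDotTail] using hm
    have := List.mem_takeWhile_imp hm'
    simp at this

-- core: a lowered string ends with '.'++e (no dot in e) iff it has a dot and the
-- lowered part after the last dot is e
lemma pv_key (e l : List Char) (he : '.' ∉ e) :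
    PySem.Chars.endswith (PySem.Chars.lower l) ('.' :: e)
      = (decide ('.' ∈ l) && (PySem.Chars.lower (pvRsplitDotTail l) == e)) := by
  rw [Bool.eq_iff_iff, PySem.Chars.endswith_iff]
  simp only [Bool.and_eq_true, decide_eq_true_eq, beq_iff_eq]
  constructor
  · rintro ⟨t, ht⟩
    rw [PySem.Chars.lower] at ht
    obtain ⟨l₁, l₂, hl, h1, h2⟩ := (List.map_eq_append_iff).mp ht.symm
    obtain ⟨c, l₃, hl₂, hc, h3⟩ := (List.map_eq_cons_iff).mp h2
    have hcdot : c = '.' := (pv_lowerChar_dot_iff c).mp hc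
    subst hcdot; subst hl₂
    have hnd : '.' ∉ l₃ := fun hm => he (h3 ▸ List.mem_map.mpr ⟨'.', hm, by decide⟩)
    have htail : pvRsplitDotTail l = l₃ := by
      rw [hl]
      unfold pvRsplitDotTail
      rw [List.reverse_append, List.reverse_cons, List.append_assoc]
      rw [List.singleton_append, pv_takeWhile_no_dot _ _ (by simpa using hnd)]
      simp
    refine ⟨by rw [hl]; simp, by rw [htail]; simpa [PySem.Chars.lower] using h3⟩
  · rintro ⟨hd, hlow⟩
    obtain ⟨pre, hdec, _⟩ := pv_exists_decomp l hd
    refine ⟨PySem.Chars.lower pre, ?_⟩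
    conv_rhs => rw [hdec]
    simp only [PySem.Chars.lower, List.map_append, List.map_cons]
    rw [show PySem.Chars.lowerChar '.' = '.' from by decide, ← hlow]
    simp [PySem.Chars.lower]

lemma pv_isIn_dot (s : String) : PySem.Str.isIn "." s = decide ('.' ∈ s.toList) := by
  by_cases h : '.' ∈ s.toList
  · simp only [h, decide_true]
    rw [show PySem.Str.isIn "." s = PySem.Chars.isIn ".".toList s.toList from by simp]
    rw [PySem.Chars.isIn_iff_infix]
    obtain ⟨p, q, hpq⟩ := List.append_of_mem h
    exact ⟨p, q, by simpa using hpq.symm⟩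
  · simp only [h, decide_false]
    rw [show PySem.Str.isIn "." s = PySem.Chars.isIn ".".toList s.toList from by simp]
    rw [PySem.Chars.isIn_eq_false_iff]
    intro hinf
    exact h (hinf.sublist.subset (by simp))

set_option maxRecDepth 4000 in
lemma pv_any_endswith (l : List Char) (exts : List (List Char))
    (hx : ∀ x ∈ exts, x.head? = some '.' ∧ '.' ∉ x.tail) :
    exts.any (fun ext => PySem.Chars.endswith (PySem.Chars.lower l) ext)
      = (decide ('.' ∈ l) && exts.contains ('.' :: PySem.Chars.lower (pvRsplitDotTail l))) := by
  induction exts with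
  | nil => simp
  | cons x rest ih =>
    obtain ⟨hh, ht⟩ := hx x List.mem_cons_self
    obtain ⟨c, xt, rfl⟩ : ∃ c xt, x = c :: xt := by
      cases x with
      | nil => simp at hh
      | cons c xt => exact ⟨c, xt, rfl⟩
    have hc : c = '.' := by simpa using hh
    subst hc
    have htl : '.' ∉ xt := by simpa using ht
    rw [List.any_cons, pv_key xt l htl, ih (fun y hy => hx y (List.mem_cons_of_mem _ hy))]
    rw [← Bool.and_or_distrib_left]
    by_cases hd : '.' ∈ l
    · simp only [hd, decide_true, Bool.true_and]
      rw [Bool.eq_iff_iff, List.contains_cons]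
      simp only [Bool.or_eq_true, beq_iff_eq, List.cons.injEq, true_and]
    · simp [hd]

theorem pv_main (filename : String) :
    is_allowed_file filename = is_allowed_file_alt filename := by
  simp only [is_allowed_file, is_allowed_file_alt]
  have hB : pvAllowedSuffixes.any
      (fun s => PySem.Chars.endswith (PySem.Chars.lower filename.toList) s.toList)
      = (pvAllowedSuffixes.map String.toList).any
        (fun ext => PySem.Chars.endswith (PySem.Chars.lower filename.toList) ext) := by
    rw [List.any_map]; rfl
  rw [hB, pv_any_endswith _ _ (by decide), pv_isIn_dot]
  have hEq : (PySem.Dict.values pvAllowedExtensions).foldl (fun acc exts => acc ++ exts) []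
      = pvAllowedSuffixes.map String.toList := by rfl
  rw [hEq]
  by_cases hd : '.' ∈ filename.toList
  · simp [hd]
  · simp [hd]

-- ===== VERDICT (by name: the statement is the Claim_ definition above) =====
theorem is_allowed_file_spec : Claim_equal_is_allowed_file := by
  intro filename _
  unfold Spec_is_allowed_file
  exact pv_main filename
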